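-- pv_equiv track=rewrite | github.com/Jack73hRipper/heros-call-arena | server/app/core/set_bonuses.py | _count_equipped_set_pieces
-- ===== SOURCE A (Python) =====
-- def _count_equipped_set_pieces(equipment: dict, set_def: dict) -> int:
--     """Count how many pieces of a given set are equipped.
--
--     Args:
--         equipment: Player's equipment dict (slot_name -> item_data dict or None).
--         set_def: The set definition from sets_config.json.
--
--     Returns:
--         Number of equipped pieces belonging to this set.
--     """
--     if not equipment:
--         return 0
--
--     set_piece_ids = {p["piece_id"] for p in set_def.get("pieces", [])}
--     count = 0
--
--     for slot_name, item_data in equipment.items():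
--         if not item_data:
--             continue
--         # Check by item_id matching set piece_id
--         item_id = item_data.get("item_id", "")
--         if item_id in set_piece_ids:
--             count += 1
--
--     return count
-- ===== SOURCE B (Python) =====
-- def _count_equipped_set_pieces(equipment: dict, set_def: dict) -> int:
--     """Count how many pieces of a given set are equipped.
--
--     B: two staged passes instead of A's membership-test loop -- first collect
--     the list of equipped item_ids (truthy slots only), then sum the number of
--     occurrences of each deduped piece_id in that list.
--     """
--     if not equipment:
--         return 0
--     ids = [d.get("item_id", "") for d in equipment.values() if d]
--     return sum(ids.count(pid) for pid in {p["piece_id"] for p in set_def.get("pieces", [])})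
-- ===== Notes on version B (the rewrite author's own statement) =====
-- stated objective: alternative
-- what changed: A loops over equipment testing each item_id against a membership set; B first extracts the list of equipped item_ids and then sums, over the deduped piece ids, how many times each occurs in that list, reversing the index/scan roles.
import Mathlib
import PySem

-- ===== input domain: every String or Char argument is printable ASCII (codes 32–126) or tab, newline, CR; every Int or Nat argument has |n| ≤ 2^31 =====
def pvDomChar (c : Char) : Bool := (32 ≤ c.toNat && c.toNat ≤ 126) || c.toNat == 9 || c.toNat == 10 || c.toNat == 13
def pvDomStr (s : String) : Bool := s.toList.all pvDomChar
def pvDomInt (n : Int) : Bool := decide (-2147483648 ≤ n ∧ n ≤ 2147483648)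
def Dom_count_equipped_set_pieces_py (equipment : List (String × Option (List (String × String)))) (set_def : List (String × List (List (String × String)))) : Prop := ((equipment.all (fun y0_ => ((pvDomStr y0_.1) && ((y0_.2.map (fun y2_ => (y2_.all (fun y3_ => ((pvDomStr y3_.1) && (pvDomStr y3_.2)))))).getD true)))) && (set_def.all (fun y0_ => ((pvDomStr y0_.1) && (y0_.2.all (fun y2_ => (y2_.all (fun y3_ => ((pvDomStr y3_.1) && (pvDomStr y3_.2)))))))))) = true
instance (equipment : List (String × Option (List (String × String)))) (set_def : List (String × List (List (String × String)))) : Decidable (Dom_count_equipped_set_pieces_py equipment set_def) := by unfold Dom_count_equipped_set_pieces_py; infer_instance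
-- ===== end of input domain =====

-- B extracts the list of equipped item_ids once and sums each deduped piece id's
-- occurrence count in that list, instead of A's per-item membership test (alternative decomposition).


-- ===== PORT A =====
-- item_data.get("item_id", "")
def pvItemId (item : List (String × String)) : String :=
  (PySem.Dict.mk item).getD "item_id" ""

-- {p["piece_id"] for p in set_def.get("pieces", [])}; the getD "" in the element is
-- exact on Pre_ (every piece dict has the "piece_id" key; elsewhere Python raises KeyError)
def pvPieceIds (set_def : List (String × List (List (String × String)))) : PySem.Set String :=
  PySem.Set.ofList (((PySem.Dict.mk set_def).getD "pieces" []).map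
    (fun p => ((PySem.Dict.mk p).get? "piece_id").getD ""))

def count_equipped_set_pieces_py (equipment : List (String × Option (List (String × String)))) (set_def : List (String × List (List (String × String)))) : Int :=
  if equipment = [] then 0
  else
    let set_piece_ids := pvPieceIds set_def
    equipment.foldl (fun count slot =>
      match slot.2 with
      | none => count            -- item_data is None: falsy
      | some item =>
        if item = [] then count  -- empty dict: falsy
        else if set_piece_ids.contains (pvItemId item) then count + 1 else count) 0

-- ===== PORT B =====
def count_equipped_set_pieces_py_alt (equipment : List (String × Option (List (String × String)))) (set_def : List (String × List (List (String × String)))) : Int :=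
  if equipment = [] then 0
  else
    -- ids = [d.get("item_id", "") for d in equipment.values() if d]
    let ids := equipment.filterMap (fun slot =>
      slot.2.bind (fun d => if d = [] then none else some ((PySem.Dict.mk d).getD "item_id" "")))
    -- sum(ids.count(pid) for pid in {p["piece_id"] for p in set_def.get("pieces", [])})
    ((PySem.Set.ofList (((PySem.Dict.mk set_def).getD "pieces" []).map
        (fun p => ((PySem.Dict.mk p).get? "piece_id").getD ""))).map
      (fun pid => (PySem.List.count ids pid : Int))).sum

-- ===== PRECONDITION & SPEC =====
-- Pre_ excludes exactly the inputs on which A raises KeyError: a piece entry of the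
-- set definition lacking the "piece_id" key (B raises there too).
def Pre_count_equipped_set_pieces_py (equipment : List (String × Option (List (String × String)))) (set_def : List (String × List (List (String × String)))) : Prop :=
  ∀ p ∈ (PySem.Dict.mk set_def).getD "pieces" [], (PySem.Dict.mk p).contains "piece_id" = true
instance (equipment : List (String × Option (List (String × String)))) (set_def : List (String × List (List (String × String)))) : Decidable (Pre_count_equipped_set_pieces_py equipment set_def) := by unfold Pre_count_equipped_set_pieces_py; infer_instance

def pvWitness_count_equipped_set_pieces_py : (List (String × Option (List (String × String)))) × (List (String × List (List (String × String)))) :=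
  ([("head", some [("item_id", "ember_helm")]), ("ring", none), ("chest", some [])],
   [("set_id", []), ("pieces", [[("piece_id", "ember_helm")], [("piece_id", "ember_boots")]])])

def Spec_count_equipped_set_pieces_py (equipment : List (String × Option (List (String × String)))) (set_def : List (String × List (List (String × String)))) (out : Int) : Prop := out = count_equipped_set_pieces_py_alt equipment set_def
instance (equipment : List (String × Option (List (String × String)))) (set_def : List (String × List (List (String × String)))) (out : Int) : Decidable (Spec_count_equipped_set_pieces_py equipment set_def out) := by unfold Spec_count_equipped_set_pieces_py; infer_instance

-- ===== CLAIM (what is proved, stated in full; the proofs are below) =====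
def Claim_equal_count_equipped_set_pieces_py : Prop := ∀ (equipment : List (String × Option (List (String × String)))) (set_def : List (String × List (List (String × String)))), Dom_count_equipped_set_pieces_py equipment set_def → Pre_count_equipped_set_pieces_py equipment set_def → Spec_count_equipped_set_pieces_py equipment set_def (count_equipped_set_pieces_py equipment set_def)

-- ===== LEMMAS AND PROOFS =====

-- the equipped item_ids of the truthy slots, in order (B's `ids` list, definitionally)
def pvIds (equipment : List (String × Option (List (String × String)))) : List String :=
  equipment.filterMap (fun slot =>
    slot.2.bind (fun d => if d = [] then none else some ((PySem.Dict.mk d).getD "item_id" "")))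

lemma pvA_fold (S : PySem.Set String) (l : List (String × Option (List (String × String)))) (acc : Int) :
    l.foldl (fun count slot =>
      match slot.2 with
      | none => count
      | some item =>
        if item = [] then count
        else if S.contains (pvItemId item) then count + 1 else count) acc
    = acc + ((pvIds l).countP (fun id => S.contains id) : Int) := by
  induction l generalizing acc with
  | nil => simp [pvIds]
  | cons hd tl ih =>
    rcases hd with ⟨name, item?⟩
    rw [List.foldl_cons]
    cases item? with
    | none =>
      rw [ih]
      have h1 : pvIds ((name, none) :: tl) = pvIds tl := by simp [pvIds]
      rw [h1]
    | some item =>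
      rw [ih]
      by_cases h : item = []
      · have h1 : pvIds ((name, some item) :: tl) = pvIds tl := by simp [pvIds, h]
        rw [h1]; simp [h]
      · have h1 : pvIds ((name, some item) :: tl) = pvItemId item :: pvIds tl := by
          simp [pvIds, h, pvItemId]
        rw [h1, List.countP_cons]
        by_cases hm : S.contains (pvItemId item) = true
        · simp only [h, if_false, hm, if_true]
          push_cast; ring
        · simp only [h, if_false, hm]
          simp

lemma pv_countP_mem_cons (pid : String) (S' : List String) (hpid : pid ∉ S') :
    ∀ ids : List String, ids.countP (fun id => decide (id ∈ pid :: S'))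
      = ids.count pid + ids.countP (fun id => decide (id ∈ S'))
  | [] => by simp
  | x :: xs => by
    rw [List.countP_cons, List.countP_cons, List.count_cons, pv_countP_mem_cons pid S' hpid xs]
    by_cases hx : x = pid
    · subst hx; simp [hpid]; omega
    · by_cases hx' : x ∈ S' <;> simp [hx, hx'] <;> omega

lemma pv_sum_count (S ids : List String) (hnd : S.Nodup) :
    (S.map (fun pid => ((ids.count pid : Nat) : Int))).sum
    = ((ids.countP (fun id => decide (id ∈ S)) : Nat) : Int) := by
  induction S with
  | nil => simp
  | cons pid S' ih =>
    rcases List.nodup_cons.mp hnd with ⟨hpid, hnd'⟩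
    rw [List.map_cons, List.sum_cons, ih hnd', pv_countP_mem_cons pid S' hpid ids]
    push_cast
    ring

theorem count_equipped_set_pieces_py_spec : Claim_equal_count_equipped_set_pieces_py := by
  intro equipment set_def _ _
  unfold Spec_count_equipped_set_pieces_py
  unfold count_equipped_set_pieces_py count_equipped_set_pieces_py_alt
  by_cases he : equipment = []
  · simp [he]
  · rw [if_neg he, if_neg he, pvA_fold]
    show (0 : Int) + ((pvIds equipment).countP (fun id => (pvPieceIds set_def).contains id) : Int)
      = ((pvPieceIds set_def).map (fun pid => (PySem.List.count (pvIds equipment) pid : Int))).sum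
    have hmap : (pvPieceIds set_def).map (fun pid => (PySem.List.count (pvIds equipment) pid : Int))
        = (pvPieceIds set_def).map (fun pid => (((pvIds equipment).count pid : Nat) : Int)) := by
      simp [PySem.List.count_eq]
    have hnd : (pvPieceIds set_def).Nodup := by
      unfold pvPieceIds; exact PySem.Set.nodup_ofList _
    rw [hmap, pv_sum_count _ _ hnd]
    have hpred : ((pvIds equipment).countP (fun id => (pvPieceIds set_def).contains id))
        = ((pvIds equipment).countP (fun id => decide (id ∈ pvPieceIds set_def))) := by
      apply List.countP_congr
      intro id _
      simp [PySem.Set.contains]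
    rw [hpred]
    ring

-- ===== VERDICT (by name: the statement is the Claim_ definition above) =====
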